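-- pv_equiv track=rewrite | github.com/dmitry-s-danilov/python_algorithms | lesson_4/task/problem_3_6_lib.py | my_func_1
-- ===== SOURCE A (Python) =====
-- def my_func_1(y):
--     """
--     Finds the sum of numeric array items
--     between the minimum and maximum elements,
--     excluding themselves.
--
--     :param y: a numeric array
--         is for to calculate the sum of items
--         between the maximum and minimum elements excluding
--     :type y: list
--
--     :return: a sum of array items
--         between the minimum and maximum elements excluding
--     :rtype: numeric
--
--     :Examples:
--
--     >>> my_func_1([1, 2, 3, 4])
--     5
--     >>> my_func_1([2, 1, 3, 4])
--     3
--     >>> my_func_1([2, 3, 1, 4])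
--
--     >>> my_func_1([2, 3, 4, 1])
--
--     >>> my_func_1([3, 2, 4, 1])
--
--     >>> my_func_1([3, 4, 2, 1])
--     2
--     >>> my_func_1([4, 3, 2, 1])
--     5
--     """
--
--     i, j = 0, 0  # indices of minimum and maximum
--     for k in range(1, len(y)):
--         if y[k] < y[i]:
--             i = k
--         elif y[k] > y[j]:
--             j = k
--     if abs(i - j) > 1:
--         r = (i + 1, j) if i < j else (j + 1, i)
--         s = 0
--         for k in range(*r):
--             s += y[k]
--         return s
-- ===== SOURCE B (Python) =====
-- def my_func_1(y):
--     n = len(y)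
--     if n == 0:
--         return None
--     # prefix-sum table: ps[k] = sum of y[:k]
--     ps = [0] * (n + 1)
--     for k in range(n):
--         ps[k + 1] = ps[k] + y[k]
--     # keyed argmin/argmax over the index range; min/max keep the FIRST extremal index on ties,
--     # matching A's strict-comparison scan
--     lo = min(range(n), key=lambda k: y[k])
--     hi = max(range(n), key=lambda k: y[k])
--     if abs(lo - hi) > 1:
--         a, b = (lo, hi) if lo < hi else (hi, lo)
--         return ps[b] - ps[a + 1]
--     return None
-- ===== Notes on version B (the rewrite author's own statement) =====
-- stated objective: alternative
-- what changed: B builds a prefix-sum table once and answers with a difference ps[b]-ps[a+1] instead of A's explicit summing loop, and finds the extremal positions by keyed argmin/argmax over the index range instead of A's hand-tracked two-index scan.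
import Mathlib
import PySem

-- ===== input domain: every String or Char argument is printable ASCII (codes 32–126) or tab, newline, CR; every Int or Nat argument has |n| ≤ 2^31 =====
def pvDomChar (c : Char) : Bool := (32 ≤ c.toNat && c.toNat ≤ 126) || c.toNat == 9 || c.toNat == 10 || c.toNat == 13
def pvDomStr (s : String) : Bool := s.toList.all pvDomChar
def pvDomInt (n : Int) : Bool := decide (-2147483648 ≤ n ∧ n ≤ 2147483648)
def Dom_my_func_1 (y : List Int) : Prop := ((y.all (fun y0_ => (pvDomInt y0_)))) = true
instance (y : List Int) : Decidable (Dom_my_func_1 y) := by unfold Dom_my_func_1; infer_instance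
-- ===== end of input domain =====

-- B replaces A's hand-tracked two-index scan and explicit summing loop by a keyed
-- argmin/argmax over the index range plus a prefix-sum table read off by difference;
-- objective: alternative.

-- ===== PORT A =====
-- A's loop body: 'if y[k] < y[i]: i = k  elif y[k] > y[j]: j = k' (state (i, j))
def myStepA (y : List Int) (ij : Int × Int) (k : Int) : Int × Int :=
  if PySem.List.pyGetD y k 0 < PySem.List.pyGetD y ij.1 0 then (k, ij.2)
  else if PySem.List.pyGetD y ij.2 0 < PySem.List.pyGetD y k 0 then (ij.1, k)
  else ij

def my_func_1 (y : List Int) : Option Int :=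
  let ij := (PySem.List.pyRange 1 (PySem.List.len y) 1).foldl (myStepA y) (0, 0)
  if 1 < |ij.1 - ij.2| then
    let r : Int × Int := if ij.1 < ij.2 then (ij.1 + 1, ij.2) else (ij.2 + 1, ij.1)
    some ((PySem.List.pyRange r.1 r.2 1).foldl (fun s k => s + PySem.List.pyGetD y k 0) 0)
  else none

-- ===== PORT B =====
def my_func_1_alt (y : List Int) : Option Int :=
  let n : Int := PySem.List.len y
  if n = 0 then none
  else
    -- ps[k] = sum of y[:k], built by one pass of 'ps[k+1] = ps[k] + y[k]'
    let ps := (PySem.List.pyRange 0 n 1).foldl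
      (fun ps k => PySem.List.pySetD ps (k + 1)
        (PySem.List.pyGetD ps k 0 + PySem.List.pyGetD y k 0))
      (List.replicate (n.toNat + 1) 0)
    -- lo = min(range(n), key=lambda k: y[k]); hi = max(range(n), key=lambda k: y[k])
    let lo := (PySem.List.min? (PySem.List.pyRange 0 n 1)
      (fun k => PySem.List.pyGetD y k 0)).getD 0
    let hi := (PySem.List.max? (PySem.List.pyRange 0 n 1)
      (fun k => PySem.List.pyGetD y k 0)).getD 0
    if 1 < |lo - hi| then
      let a := if lo < hi then lo else hi
      let b := if lo < hi then hi else lo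
      some (PySem.List.pyGetD ps b 0 - PySem.List.pyGetD ps (a + 1) 0)
    else none

-- ===== PRECONDITION & SPEC =====
def Spec_my_func_1 (y : List Int) (out : Option Int) : Prop := out = my_func_1_alt y
instance (y : List Int) (out : Option Int) : Decidable (Spec_my_func_1 y out) := by unfold Spec_my_func_1; infer_instance

-- ===== CLAIM (what is proved, stated in full; the proofs are below) =====
def Claim_equal_my_func_1 : Prop := ∀ (y : List Int), Dom_my_func_1 y → Spec_my_func_1 y (my_func_1 y)

-- ===== LEMMAS AND PROOFS =====

/-- Proof-only model of a first-minimum scan: state (best index, best value). -/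
def runMin : List Int → Nat → Nat × Int → Nat × Int
  | [], _, c => c
  | v :: t, k, c => runMin t (k + 1) (if v < c.2 then (k, v) else c)

/-- Proof-only model of a first-maximum scan. -/
def runMax : List Int → Nat → Nat × Int → Nat × Int
  | [], _, c => c
  | v :: t, k, c => runMax t (k + 1) (if c.2 < v then (k, v) else c)

def fstMin : List Int → Nat × Int
  | [] => (0, 0)
  | x :: t => runMin t 1 (0, x)

def fstMax : List Int → Nat × Int
  | [] => (0, 0)
  | x :: t => runMax t 1 (0, x)

theorem runMin_spec (t : List Int) : ∀ (p : List Int) (c : Nat × Int),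
    c.1 < p.length → p.getD c.1 0 = c.2 → (∀ v ∈ p, c.2 ≤ v) →
    (runMin t p.length c).1 < p.length + t.length ∧
    (p ++ t).getD (runMin t p.length c).1 0 = (runMin t p.length c).2 ∧
    (∀ v ∈ p ++ t, (runMin t p.length c).2 ≤ v) := by
  induction t with
  | nil =>
    intro p c h1 h2 h3
    refine ⟨by simpa [runMin] using by omega, by simpa [runMin] using h2,
      by simpa [runMin] using h3⟩
  | cons v t ih =>
    intro p c h1 h2 h3
    have hsplit : p ++ v :: t = (p ++ [v]) ++ t := by simp
    have hgetv : (p ++ [v]).getD p.length 0 = v := by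
      rw [List.getD_eq_getElem _ _ (by simp)]; simp
    by_cases hv : v < c.2
    · have key : runMin (v :: t) p.length c = runMin t (p ++ [v]).length (p.length, v) := by
        simp [runMin, hv]
      have main := ih (p ++ [v]) (p.length, v) (by simp) hgetv ?_
      · rw [key, hsplit]
        have h1' := main.1
        exact ⟨by simp at h1' ⊢; omega, main.2.1, main.2.2⟩
      · intro w hw
        rcases List.mem_append.mp hw with hw | hw
        · exact le_of_lt (lt_of_lt_of_le hv (h3 w hw))
        · simp at hw; omega
    · have key : runMin (v :: t) p.length c = runMin t (p ++ [v]).length c := by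
        simp [runMin, hv]
      have main := ih (p ++ [v]) c (by simp; omega) ?_ ?_
      · rw [key, hsplit]
        have h1' := main.1
        exact ⟨by simp at h1' ⊢; omega, main.2.1, main.2.2⟩
      · rw [List.getD_append _ _ _ _ h1]; exact h2
      · intro w hw
        rcases List.mem_append.mp hw with hw | hw
        · exact h3 w hw
        · simp at hw; omega

theorem runMax_spec (t : List Int) : ∀ (p : List Int) (c : Nat × Int),
    c.1 < p.length → p.getD c.1 0 = c.2 → (∀ v ∈ p, v ≤ c.2) →
    (runMax t p.length c).1 < p.length + t.length ∧
    (p ++ t).getD (runMax t p.length c).1 0 = (runMax t p.length c).2 ∧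
    (∀ v ∈ p ++ t, v ≤ (runMax t p.length c).2) := by
  induction t with
  | nil =>
    intro p c h1 h2 h3
    refine ⟨by simpa [runMax] using by omega, by simpa [runMax] using h2,
      by simpa [runMax] using h3⟩
  | cons v t ih =>
    intro p c h1 h2 h3
    have hsplit : p ++ v :: t = (p ++ [v]) ++ t := by simp
    have hgetv : (p ++ [v]).getD p.length 0 = v := by
      rw [List.getD_eq_getElem _ _ (by simp)]; simp
    by_cases hv : c.2 < v
    · have key : runMax (v :: t) p.length c = runMax t (p ++ [v]).length (p.length, v) := by
        simp [runMax, hv]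
      have main := ih (p ++ [v]) (p.length, v) (by simp) hgetv ?_
      · rw [key, hsplit]
        have h1' := main.1
        exact ⟨by simp at h1' ⊢; omega, main.2.1, main.2.2⟩
      · intro w hw
        rcases List.mem_append.mp hw with hw | hw
        · exact le_of_lt (lt_of_le_of_lt (h3 w hw) hv)
        · simp at hw; omega
    · have key : runMax (v :: t) p.length c = runMax t (p ++ [v]).length c := by
        simp [runMax, hv]
      have main := ih (p ++ [v]) c (by simp; omega) ?_ ?_
      · rw [key, hsplit]
        have h1' := main.1
        exact ⟨by simp at h1' ⊢; omega, main.2.1, main.2.2⟩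
      · rw [List.getD_append _ _ _ _ h1]; exact h2
      · intro w hw
        rcases List.mem_append.mp hw with hw | hw
        · exact h3 w hw
        · simp at hw; omega

theorem fstMin_spec (x : Int) (t : List Int) :
    (fstMin (x :: t)).1 < (x :: t).length ∧
    (x :: t).getD (fstMin (x :: t)).1 0 = (fstMin (x :: t)).2 ∧
    (∀ v ∈ x :: t, (fstMin (x :: t)).2 ≤ v) := by
  have main := runMin_spec t [x] (0, x) (by simp) (by simp) (by simp)
  simp only [List.length_cons, List.singleton_append] at main ⊢
  exact ⟨by have h := main.1; simp [fstMin] at h ⊢; omega, main.2.1, main.2.2⟩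

theorem fstMax_spec (x : Int) (t : List Int) :
    (fstMax (x :: t)).1 < (x :: t).length ∧
    (x :: t).getD (fstMax (x :: t)).1 0 = (fstMax (x :: t)).2 ∧
    (∀ v ∈ x :: t, v ≤ (fstMax (x :: t)).2) := by
  have main := runMax_spec t [x] (0, x) (by simp) (by simp) (by simp)
  simp only [List.length_cons, List.singleton_append] at main ⊢
  exact ⟨by have h := main.1; simp [fstMax] at h ⊢; omega, main.2.1, main.2.2⟩

theorem runMin_append (v : Int) (t : List Int) : ∀ (k : Nat) (c : Nat × Int),
    runMin (t ++ [v]) k c =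
      (if v < (runMin t k c).2 then (k + t.length, v) else runMin t k c) := by
  induction t with
  | nil => intro k c; simp [runMin]
  | cons w t ih =>
    intro k c
    simp only [List.cons_append, runMin, List.length_cons]
    rw [ih]
    have h : k + 1 + t.length = k + (t.length + 1) := by omega
    rw [h]

theorem runMax_append (v : Int) (t : List Int) : ∀ (k : Nat) (c : Nat × Int),
    runMax (t ++ [v]) k c =
      (if (runMax t k c).2 < v then (k + t.length, v) else runMax t k c) := by
  induction t with
  | nil => intro k c; simp [runMax]
  | cons w t ih =>
    intro k c
    simp only [List.cons_append, runMax, List.length_cons]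
    rw [ih]
    have h : k + 1 + t.length = k + (t.length + 1) := by omega
    rw [h]

theorem fstMin_append (x v : Int) (t : List Int) :
    fstMin ((x :: t) ++ [v]) =
      (if v < (fstMin (x :: t)).2 then ((x :: t).length, v) else fstMin (x :: t)) := by
  have h := runMin_append v t 1 (0, x)
  simp only [fstMin, List.cons_append, List.length_cons]
  rw [h]
  congr 2
  omega

theorem fstMax_append (x v : Int) (t : List Int) :
    fstMax ((x :: t) ++ [v]) =
      (if (fstMax (x :: t)).2 < v then ((x :: t).length, v) else fstMax (x :: t)) := by
  have h := runMax_append v t 1 (0, x)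
  simp only [fstMax, List.cons_append, List.length_cons]
  rw [h]
  congr 2
  omega

/-- A's loop over indices 1..m computes the first-min and first-max indices of y.take m. -/
theorem loopA_take (y : List Int) (m : Nat) (h1 : 1 ≤ m) (h2 : m ≤ y.length) :
    (PySem.List.pyRange 1 (m : Int) 1).foldl (myStepA y) (0, 0)
      = (((fstMin (y.take m)).1 : Int), ((fstMax (y.take m)).1 : Int)) := by
  induction m with
  | zero => omega
  | succ m ih =>
    by_cases hm0 : m = 0
    · subst hm0
      cases y with
      | nil => simp at h2
      | cons x t =>
        simp [PySem.List.pyRange_one_eq_nil (by norm_num : (1 : Int) ≤ 1), fstMin, fstMax,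
          runMin, runMax]
    · have hm' : 1 ≤ m := by omega
      have hmlen : m < y.length := by omega
      have hcast : ((m + 1 : Nat) : Int) = (m : Int) + 1 := by push_cast; ring
      rw [hcast, PySem.List.pyRange_one_succ_right (by exact_mod_cast hm'), List.foldl_append,
        ih hm' (by omega)]
      simp only [List.foldl_cons, List.foldl_nil]
      set l := y.take m with hl
      have hlen : l.length = m := by rw [hl]; simp; omega
      obtain ⟨x, t, hxt⟩ : ∃ x t, l = x :: t := by
        cases hc : l with
        | nil => rw [hc] at hlen; simp at hlen; omega
        | cons a b => exact ⟨a, b, rfl⟩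
      have Smin := fstMin_spec x t
      have Smax := fstMax_spec x t
      rw [← hxt] at Smin Smax
      obtain ⟨hm1, hm2, hm3⟩ := Smin
      obtain ⟨hM1, hM2, hM3⟩ := Smax
      have hgd : ∀ j, j < m → l.getD j 0 = y.getD j 0 := by
        intro j hj
        rw [List.getD_eq_getElem _ _ (by omega), List.getD_eq_getElem _ _ (by omega)]
        exact List.getElem_take
      have hvm : y.getD m 0 = y[m] := List.getD_eq_getElem _ _ hmlen
      have htake : y.take (m + 1) = l ++ [y[m]] := by
        rw [hl, List.take_add_one, List.getElem?_eq_getElem hmlen]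
        rfl
      have hminA := fstMin_append x y[m] t
      have hmaxA := fstMax_append x y[m] t
      rw [← hxt] at hminA hmaxA
      have hmle : (fstMin l).2 ≤ (fstMax l).2 := by
        have hmem : l.getD (fstMax l).1 0 ∈ l := by
          rw [List.getD_eq_getElem _ _ hM1]
          exact List.getElem_mem hM1
        rw [hM2] at hmem
        exact hm3 _ hmem
      have e1 : y.getD (fstMin l).1 0 = (fstMin l).2 := by
        rw [← hgd _ (by omega), hm2]
      have e2 : y.getD (fstMax l).1 0 = (fstMax l).2 := by
        rw [← hgd _ (by omega), hM2]
      unfold myStepA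
      simp only [PySem.List.pyGetD_natCast, e1, e2, hvm, htake, hminA, hmaxA]
      split_ifs with hc1 hc2 hc2
      · exfalso; omega
      · simp [hlen]
      · simp [hlen]
      · rfl

/-- B's keyed argmin over range(m) (the fold behind min?) is the first-min index of y.take m. -/
theorem loopB_min (y : List Int) (m : Nat) (h1 : 1 ≤ m) (h2 : m ≤ y.length) :
    PySem.List.min? (PySem.List.pyRange 0 (m : Int) 1) (fun k => PySem.List.pyGetD y k 0)
      = some (((fstMin (y.take m)).1 : Nat) : Int) := by
  simp only [PySem.List.min?]
  induction m with
  | zero => omega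
  | succ m ih =>
    by_cases hm0 : m = 0
    · subst hm0
      cases y with
      | nil => simp at h2
      | cons x t =>
        rw [show ((0 + 1 : Nat) : Int) = 0 + 1 by norm_num, PySem.List.pyRange_one_singleton]
        simp [fstMin, runMin]
    · have hm' : 1 ≤ m := by omega
      have hmlen : m < y.length := by omega
      have hcast : ((m + 1 : Nat) : Int) = (m : Int) + 1 := by push_cast; ring
      rw [hcast, PySem.List.pyRange_one_succ_right (by positivity), List.foldl_append,
        ih hm' (by omega)]
      simp only [List.foldl_cons, List.foldl_nil]
      set l := y.take m with hl
      have hlen : l.length = m := by rw [hl]; simp; omega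
      obtain ⟨x, t, hxt⟩ : ∃ x t, l = x :: t := by
        cases hc : l with
        | nil => rw [hc] at hlen; simp at hlen; omega
        | cons a b => exact ⟨a, b, rfl⟩
      have Smin := fstMin_spec x t
      rw [← hxt] at Smin
      obtain ⟨hm1, hm2, _⟩ := Smin
      have hvm : y.getD m 0 = y[m] := List.getD_eq_getElem _ _ hmlen
      have htake : y.take (m + 1) = l ++ [y[m]] := by
        rw [hl, List.take_add_one, List.getElem?_eq_getElem hmlen]
        rfl
      have hminA := fstMin_append x y[m] t
      rw [← hxt] at hminA
      have hgd : ∀ j, j < m → l.getD j 0 = y.getD j 0 := by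
        intro j hj
        rw [List.getD_eq_getElem _ _ (by omega), List.getD_eq_getElem _ _ (by omega)]
        exact List.getElem_take
      have e1 : y.getD (fstMin l).1 0 = (fstMin l).2 := by
        rw [← hgd _ (by omega), hm2]
      simp only [PySem.List.pyGetD_natCast, e1, hvm, htake, hminA]
      split_ifs with hc1
      · simp [hlen]
      · rfl

/-- B's keyed argmax over range(m) (the fold behind max?) is the first-max index of y.take m. -/
theorem loopB_max (y : List Int) (m : Nat) (h1 : 1 ≤ m) (h2 : m ≤ y.length) :
    PySem.List.max? (PySem.List.pyRange 0 (m : Int) 1) (fun k => PySem.List.pyGetD y k 0)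
      = some (((fstMax (y.take m)).1 : Nat) : Int) := by
  simp only [PySem.List.max?]
  induction m with
  | zero => omega
  | succ m ih =>
    by_cases hm0 : m = 0
    · subst hm0
      cases y with
      | nil => simp at h2
      | cons x t =>
        rw [show ((0 + 1 : Nat) : Int) = 0 + 1 by norm_num, PySem.List.pyRange_one_singleton]
        simp [fstMax, runMax]
    · have hm' : 1 ≤ m := by omega
      have hmlen : m < y.length := by omega
      have hcast : ((m + 1 : Nat) : Int) = (m : Int) + 1 := by push_cast; ring
      rw [hcast, PySem.List.pyRange_one_succ_right (by positivity), List.foldl_append,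
        ih hm' (by omega)]
      simp only [List.foldl_cons, List.foldl_nil]
      set l := y.take m with hl
      have hlen : l.length = m := by rw [hl]; simp; omega
      obtain ⟨x, t, hxt⟩ : ∃ x t, l = x :: t := by
        cases hc : l with
        | nil => rw [hc] at hlen; simp at hlen; omega
        | cons a b => exact ⟨a, b, rfl⟩
      have Smax := fstMax_spec x t
      rw [← hxt] at Smax
      obtain ⟨hM1, hM2, _⟩ := Smax
      have hvm : y.getD m 0 = y[m] := List.getD_eq_getElem _ _ hmlen
      have htake : y.take (m + 1) = l ++ [y[m]] := by
        rw [hl, List.take_add_one, List.getElem?_eq_getElem hmlen]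
        rfl
      have hmaxA := fstMax_append x y[m] t
      rw [← hxt] at hmaxA
      have hgd : ∀ j, j < m → l.getD j 0 = y.getD j 0 := by
        intro j hj
        rw [List.getD_eq_getElem _ _ (by omega), List.getD_eq_getElem _ _ (by omega)]
        exact List.getElem_take
      have e2 : y.getD (fstMax l).1 0 = (fstMax l).2 := by
        rw [← hgd _ (by omega), hM2]
      simp only [PySem.List.pyGetD_natCast, e2, hvm, htake, hmaxA]
      split_ifs with hc1
      · simp [hlen]
      · rfl

/-- Proof-only model of the prefix-sum table after processing indices 0..m-1. -/
def psModel (y : List Int) (m : Nat) : List Int :=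
  (List.range (y.length + 1)).map (fun k => if k ≤ m then (y.take k).sum else 0)

/-- B's prefix-sum loop over range(m) produces the table psModel y m. -/
theorem ps_loop (y : List Int) : ∀ (m : Nat), m ≤ y.length →
    (PySem.List.pyRange 0 (m : Int) 1).foldl
      (fun ps k => PySem.List.pySetD ps (k + 1)
        (PySem.List.pyGetD ps k 0 + PySem.List.pyGetD y k 0))
      (List.replicate (y.length + 1) 0) = psModel y m := by
  intro m
  induction m with
  | zero =>
    intro _
    rw [show ((0 : Nat) : Int) = 0 by norm_num,
      PySem.List.pyRange_one_eq_nil (le_refl 0), List.foldl_nil]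
    apply List.ext_getElem
    · simp [psModel]
    · intro i h1 h2
      simp only [psModel, List.getElem_map, List.getElem_range, List.getElem_replicate,
        Nat.le_zero]
      by_cases h0 : i = 0
      · subst h0; simp
      · simp [h0]
  | succ m ih =>
    intro h2
    have hmlen : m < y.length := by omega
    have hcast : ((m + 1 : Nat) : Int) = (m : Int) + 1 := by push_cast; ring
    rw [hcast, PySem.List.pyRange_one_succ_right (by positivity), List.foldl_append,
      ih (by omega)]
    simp only [List.foldl_cons, List.foldl_nil]
    have hget1 : PySem.List.pyGetD (psModel y m) (m : Int) 0 = (y.take m).sum := by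
      rw [PySem.List.pyGetD_natCast, List.getD_eq_getElem _ _ (by simp [psModel]; omega)]
      simp [psModel]
    have hget2 : PySem.List.pyGetD y (m : Int) 0 = y[m] := by
      rw [PySem.List.pyGetD_natCast]
      exact List.getD_eq_getElem _ _ hmlen
    rw [hget1, hget2, show (m : Int) + 1 = ((m + 1 : Nat) : Int) by push_cast; ring,
      PySem.List.pySetD_natCast]
    apply List.ext_getElem
    · simp [psModel]
    · intro i h1 h2'
      have hi : i < y.length + 1 := by simpa [psModel] using h2'
      rw [List.getElem_set]
      simp only [psModel, List.getElem_map, List.getElem_range]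
      by_cases hie : m + 1 = i
      · subst hie
        have htk : List.take (m + 1) y = List.take m y ++ [y[m]] := by
          rw [List.take_add_one, List.getElem?_eq_getElem hmlen]
          rfl
        rw [if_pos rfl, if_pos (le_refl (m + 1)), htk, List.sum_append]
        simp
      · rw [if_neg hie]
        split_ifs with c1 c2 c2
        · rfl
        · omega
        · omega
        · rfl

/-- Reading the full prefix-sum table: ps[q] - ps[p] is the sum of the slice y[p:q]. -/
theorem ps_diff (y : List Int) (p q : Nat) (hpq : p ≤ q) (hq : q ≤ y.length) :
    PySem.List.pyGetD (psModel y y.length) ((q : Nat) : Int) 0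
      - PySem.List.pyGetD (psModel y y.length) ((p : Nat) : Int) 0
      = (PySem.List.slice y (some ((p : Nat) : Int)) (some ((q : Nat) : Int))).sum := by
  have hget : ∀ r : Nat, r ≤ y.length →
      PySem.List.pyGetD (psModel y y.length) ((r : Nat) : Int) 0 = (y.take r).sum := by
    intro r hr
    rw [PySem.List.pyGetD_natCast, List.getD_eq_getElem _ _ (by simp [psModel]; omega)]
    simp [psModel, hr]
  rw [hget q hq, hget p (le_trans hpq hq), PySem.List.slice_natCast]
  have hsplit : y.take q = y.take p ++ (y.drop p).take (q - p) := by
    rw [← List.take_add]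
    congr 1
    omega
  rw [hsplit, List.sum_append]
  ring

/-- Summing y[k] over range(a,b) equals the sum of the slice y[a:b]. -/
theorem sum_bridge (y : List Int) (a b : Int) (ha : 0 ≤ a) (hab : a ≤ b)
    (hb : b ≤ y.length) :
    (PySem.List.pyRange a b 1).foldl (fun s k => s + PySem.List.pyGetD y k 0) 0
      = (PySem.List.slice y (some a) (some b)).sum := by
  rw [PySem.List.slice_of_nonneg y ha (by omega) (by omega) hb]
  rw [PySem.List.foldl_add]
  have hmap : (PySem.List.pyRange a b 1).map (fun k => PySem.List.pyGetD y k 0)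
      = List.take (b.toNat - a.toNat) (List.drop a.toNat y) := by
    apply List.ext_getElem
    · simp [PySem.List.length_pyRange_one]
      omega
    · intro i hi1 hi2
      simp only [List.getElem_map]
      rw [PySem.List.getElem_pyRange_one]
      have hib : (i : Int) < b - a := by
        have := hi1
        simp [PySem.List.length_pyRange_one] at this
        omega
      rw [PySem.List.pyGetD_eq_getElem y 0 (by omega) (by omega)]
      rw [List.getElem_take, List.getElem_drop]
      congr 1
      omega
  rw [hmap]
  omega

-- ===== VERDICT (by name: the statement is the Claim_ definition above) =====
theorem my_func_1_spec : Claim_equal_my_func_1 := by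
  unfold Claim_equal_my_func_1
  intro y _
  unfold Spec_my_func_1
  cases y with
  | nil => decide
  | cons x t =>
    unfold my_func_1 my_func_1_alt
    simp only [PySem.List.len_eq, Int.toNat_natCast]
    have h0 : ¬(((x :: t).length : Nat) : Int) = 0 := by
      exact Int.natCast_ne_zero.mpr (by simp)
    rw [if_neg h0]
    rw [loopA_take (x :: t) (x :: t).length (by simp) le_rfl,
      loopB_min (x :: t) (x :: t).length (by simp) le_rfl,
      loopB_max (x :: t) (x :: t).length (by simp) le_rfl,
      ps_loop (x :: t) (x :: t).length le_rfl, List.take_length]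
    simp only [Option.getD_some]
    obtain ⟨hm1, _, _⟩ := fstMin_spec x t
    obtain ⟨hM1, _, _⟩ := fstMax_spec x t
    set I := (fstMin (x :: t)).1 with hI
    set J := (fstMax (x :: t)).1 with hJ
    by_cases hc : 1 < |(I : Int) - (J : Int)|
    · rw [if_pos hc, if_pos hc]
      have hgap : 1 < (I : Int) - J ∨ 1 < (J : Int) - I := by
        rcases abs_cases ((I : Int) - (J : Int)) with ⟨he, _⟩ | ⟨he, _⟩ <;>
          rw [he] at hc <;> omega
      congr 1
      by_cases hIJ : (I : Int) < (J : Int)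
      · rw [if_pos hIJ, if_pos hIJ, if_pos hIJ]
        have hIJ' : I + 1 ≤ J := by omega
        rw [sum_bridge (x :: t) ((I : Int) + 1) (J : Int) (by omega) (by exact_mod_cast hIJ')
          (by exact_mod_cast Int.ofNat_le.mpr (le_of_lt hM1))]
        rw [show ((I : Int) + 1 : Int) = ((I + 1 : Nat) : Int) by push_cast; ring]
        rw [← ps_diff (x :: t) (I + 1) J hIJ' (by omega)]
      · rw [if_neg hIJ, if_neg hIJ, if_neg hIJ]
        have hJI' : J + 1 ≤ I := by omega
        rw [sum_bridge (x :: t) ((J : Int) + 1) (I : Int) (by omega) (by exact_mod_cast hJI')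
          (by exact_mod_cast Int.ofNat_le.mpr (le_of_lt hm1))]
        rw [show ((J : Int) + 1 : Int) = ((J + 1 : Nat) : Int) by push_cast; ring]
        rw [← ps_diff (x :: t) (J + 1) I hJI' (by omega)]
    · rw [if_neg hc, if_neg hc]
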